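-- pv_equiv track=rewrite | github.com/axellbrendow/leetcode | encode-string-with-shortest-length.py | encode_with_shortest_length
-- ===== SOURCE A (Python) =====
-- def compress(i, substr, dp):
-- 	compressed = substr
-- 	for k in range(len(substr)//2):
-- 		pattern = substr[:k+1]
-- 		if len(substr) % len(pattern) == 0 and substr.replace(pattern, '') == '':
-- 			num_repetitions = len(substr) // len(pattern)
-- 			encoded = f'{num_repetitions}[{dp[i][i+k]}]'
-- 			if len(encoded) < len(compressed):
-- 				compressed = encoded
-- 	return compressed
--
-- def get_best_solution_for(i, j, dp, compressed):
-- 	for k in range(i + 1, j):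
-- 		prev_solution = dp[i][k] + dp[k+1][j]
-- 		if len(prev_solution) < len(compressed):
-- 			compressed = prev_solution
-- 	return compressed
--
-- def encode_with_shortest_length(string):
-- 	dp = [[''] * len(string) for _ in range(len(string))]
-- 	for size in range(1, len(string) + 1):
-- 		for i in range(len(string) - size + 1):
-- 			j = i + size - 1
-- 			substr = string[i:j+1]
-- 			if size < 5:
-- 				dp[i][j] = substr
-- 				continue
-- 			compressed = compress(i, substr, dp)
-- 			dp[i][j] = get_best_solution_for(i, j, dp, compressed)
-- 	return dp[0][len(string) - 1]
-- ===== SOURCE B (Python) =====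
-- def encode_with_shortest_length(string):
--     if not string:
--         return ''
--     memo = {}
--
--     def best(i, j):
--         key = (i, j)
--         if key in memo:
--             return memo[key]
--         size = j - i + 1
--         sub = string[i:j + 1]
--         if size < 5:
--             memo[key] = sub
--             return sub
--         res = sub
--         for plen in range(1, size // 2 + 1):
--             if size % plen == 0 and string[i:j + 1 - plen] == string[i + plen:j + 1]:
--                 enc = str(size // plen) + '[' + best(i, i + plen - 1) + ']'
--                 if len(enc) < len(res):
--                     res = enc
--         for k in range(i + 1, j):
--             cand = best(i, k) + best(k + 1, j)
--             if len(cand) < len(res):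
--                 res = cand
--         memo[key] = res
--         return res
--
--     return best(0, len(string) - 1)
-- ===== Notes on version B (the rewrite author's own statement) =====
-- stated objective: alternative
-- what changed: Replaces the bottom-up size-by-size DP table with a memoized top-down recursion best(i,j), and replaces the substr.replace(pattern,'')=='' tiling test with the shifted-substring comparison string[i:j+1-plen]==string[i+plen:j+1], keeping the exact candidate order and strict-< tie-breaking.
-- crash fix: On the empty string A raises IndexError (dp[0][-1] on an empty table) while B returns ''. — e.g. on encode_with_shortest_length(""): A raises IndexError, B returns ""
import Mathlib
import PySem

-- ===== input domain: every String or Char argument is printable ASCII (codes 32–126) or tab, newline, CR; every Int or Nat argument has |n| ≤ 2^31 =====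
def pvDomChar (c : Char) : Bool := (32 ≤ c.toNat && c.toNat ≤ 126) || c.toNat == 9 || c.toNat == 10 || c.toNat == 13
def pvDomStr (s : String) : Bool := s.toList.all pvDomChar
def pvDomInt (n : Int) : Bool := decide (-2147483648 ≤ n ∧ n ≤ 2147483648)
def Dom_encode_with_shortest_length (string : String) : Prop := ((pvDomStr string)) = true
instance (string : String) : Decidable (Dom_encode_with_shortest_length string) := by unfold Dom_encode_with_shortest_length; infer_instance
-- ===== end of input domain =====

-- B replaces A's bottom-up DP table with a memoized top-down recursion best(i,j) and a
-- shifted-substring tiling test; same return value on every non-empty string (A raises IndexError on "").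

-- ===== PORT A =====
-- dp[i][j] read/write; every reachable index is in range, getD defaults are never hit there
def pvA_get (dp : List (List (List Char))) (i j : Nat) : List Char := (dp.getD i []).getD j []

def pvA_set (dp : List (List (List Char))) (i j : Nat) (v : List Char) : List (List (List Char)) :=
  dp.set i ((dp.getD i []).set j v)

-- compress(i, substr, dp)
def pvA_compress (dp : List (List (List Char))) (i : Nat) (substr : List Char) : List Char :=
  (List.range (substr.length / 2)).foldl (fun compressed (k : Nat) =>
    let pattern := PySem.List.slice substr none (some ((k : Int) + 1))   -- substr[:k+1]
    if PySem.Int.mod (substr.length : Int) (pattern.length : Int) == 0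
        && (PySem.Chars.replace substr pattern [] == []) then
      let encoded := PySem.Int.toChars (PySem.Int.floordiv (substr.length : Int) (pattern.length : Int))
        ++ '[' :: pvA_get dp i (i + k) ++ [']']                          -- f'{num}[{dp[i][i+k]}]'
      if encoded.length < compressed.length then encoded else compressed
    else compressed) substr

-- get_best_solution_for(i, j, dp, compressed); range(i+1, j) over naturals
def pvA_best (dp : List (List (List Char))) (i j : Nat) (compressed : List Char) : List Char :=
  (List.range' (i + 1) (j - (i + 1))).foldl (fun compressed k =>
    let prev := pvA_get dp i k ++ pvA_get dp (k + 1) j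
    if prev.length < compressed.length then prev else compressed) compressed

def encode_with_shortest_length (string : String) : String :=
  let cs := string.toList
  let n := cs.length
  let dp0 : List (List (List Char)) := List.replicate n (List.replicate n [])
  let dp := (List.range n).foldl (fun dp s =>
      let size := s + 1                                                  -- size in range(1, n+1)
      (List.range (n - size + 1)).foldl (fun dp i =>
        let j := i + size - 1
        let substr := PySem.List.slice cs (some (i : Int)) (some ((j : Int) + 1))   -- string[i:j+1]
        if size < 5 then pvA_set dp i j substr
        else pvA_set dp i j (pvA_best dp i j (pvA_compress dp i substr))) dp) dp0
  String.ofList (pvA_get dp 0 (n - 1))                                       -- dp[0][len-1] (IndexError on "")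

-- ===== PORT B =====
-- best(i, j) with the memo dict threaded through; only called with i ≤ j
def pvB_best (cs : List Char) (i j : Nat) (memo : PySem.Dict (Nat × Nat) (List Char)) :
    List Char × PySem.Dict (Nat × Nat) (List Char) :=
  match memo.get? (i, j) with
  | some v => (v, memo)
  | none =>
    let sub := PySem.List.slice cs (some (i : Int)) (some ((j : Int) + 1))   -- string[i:j+1]
    if h5 : j + 1 - i < 5 then (sub, memo.insert (i, j) sub)             -- size = j - i + 1
    else
      let st1 := (List.range' 1 ((j + 1 - i) / 2)).attach.foldl (fun st pl =>   -- plen in range(1, size//2+1)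
        if PySem.Int.mod ((j + 1 - i : Nat) : Int) (pl.1 : Int) == 0
            && (PySem.List.slice cs (some (i : Int)) (some ((j : Int) + 1 - (pl.1 : Int)))
                == PySem.List.slice cs (some ((i : Int) + (pl.1 : Int))) (some ((j : Int) + 1))) then
          let pr := pvB_best cs i (i + pl.1 - 1) st.2
          let enc := PySem.Int.toChars (PySem.Int.floordiv ((j + 1 - i : Nat) : Int) (pl.1 : Int))
            ++ '[' :: pr.1 ++ [']']
          (if enc.length < st.1.length then enc else st.1, pr.2)
        else st) (sub, memo)
      let st2 := (List.range' (i + 1) (j - (i + 1))).attach.foldl (fun st k =>   -- k in range(i+1, j)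
        let pa := pvB_best cs i k.1 st.2
        let pb := pvB_best cs (k.1 + 1) j pa.2
        let cand := pa.1 ++ pb.1
        (if cand.length < st.1.length then cand else st.1, pb.2)) st1
      (st2.1, st2.2.insert (i, j) st2.1)
termination_by j + 1 - i
decreasing_by
  · have := List.mem_range'_1.mp pl.2; omega
  · have := List.mem_range'_1.mp k.2; omega
  · have := List.mem_range'_1.mp k.2; omega

def encode_with_shortest_length_alt (string : String) : String :=
  let cs := string.toList
  if cs.isEmpty then "" else String.ofList (pvB_best cs 0 (cs.length - 1) PySem.Dict.empty).1

-- ===== PRECONDITION & SPEC =====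
-- Pre_ excludes exactly the empty string, on which A raises IndexError (dp[0][-1] on an empty table)
def Pre_encode_with_shortest_length (string : String) : Prop := string ≠ ""
instance (string : String) : Decidable (Pre_encode_with_shortest_length string) := by
  unfold Pre_encode_with_shortest_length; infer_instance
def pvWitness_encode_with_shortest_length : String := "aaaaa"

-- On the empty string A raises IndexError (dp[0][-1] on an empty table) while B returns ''.
def Raises_encode_with_shortest_length (string : String) : Prop := string = ""
instance (string : String) : Decidable (Raises_encode_with_shortest_length string) := by
  unfold Raises_encode_with_shortest_length; infer_instance
def pvRaiseWitness_encode_with_shortest_length : String := ""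
def pvRaiseWitnessOut_encode_with_shortest_length : String := ""

def Spec_encode_with_shortest_length (string : String) (out : String) : Prop :=
  out = encode_with_shortest_length_alt string
instance (string : String) (out : String) : Decidable (Spec_encode_with_shortest_length string out) := by
  unfold Spec_encode_with_shortest_length; infer_instance

-- ===== CLAIM (what is proved, stated in full; the proofs are below) =====
def Claim_equal_encode_with_shortest_length : Prop := ∀ (string : String), Dom_encode_with_shortest_length string → Pre_encode_with_shortest_length string → Spec_encode_with_shortest_length string (encode_with_shortest_length string)
def Claim_raises_encode_with_shortest_length : Prop := (∀ (string : String), Dom_encode_with_shortest_length string → Raises_encode_with_shortest_length string → ¬ Pre_encode_with_shortest_length string) ∧ (Dom_encode_with_shortest_length (pvRaiseWitness_encode_with_shortest_length) ∧ Raises_encode_with_shortest_length (pvRaiseWitness_encode_with_shortest_length) ∧ encode_with_shortest_length_alt (pvRaiseWitness_encode_with_shortest_length) = pvRaiseWitnessOut_encode_with_shortest_length)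

-- ===== LEMMAS AND PROOFS =====

-- the shared pure recursion: what both programs compute for string[i:j+1] (B's textual shape, no memo)
def pvBest (cs : List Char) (i j : Nat) : List Char :=
  let sub := PySem.List.slice cs (some (i : Int)) (some ((j : Int) + 1))
  if h5 : j + 1 - i < 5 then sub
  else
    let r1 := (List.range' 1 ((j + 1 - i) / 2)).attach.foldl (fun res pl =>
      if PySem.Int.mod ((j + 1 - i : Nat) : Int) (pl.1 : Int) == 0
          && (PySem.List.slice cs (some (i : Int)) (some ((j : Int) + 1 - (pl.1 : Int)))
              == PySem.List.slice cs (some ((i : Int) + (pl.1 : Int))) (some ((j : Int) + 1))) then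
        let enc := PySem.Int.toChars (PySem.Int.floordiv ((j + 1 - i : Nat) : Int) (pl.1 : Int))
          ++ '[' :: pvBest cs i (i + pl.1 - 1) ++ [']']
        if enc.length < res.length then enc else res
      else res) sub
    (List.range' (i + 1) (j - (i + 1))).attach.foldl (fun res k =>
      let cand := pvBest cs i k.1 ++ pvBest cs (k.1 + 1) j
      if cand.length < res.length then cand else res) r1
termination_by j + 1 - i
decreasing_by
  · have := List.mem_range'_1.mp pl.2; omega
  · have := List.mem_range'_1.mp k.2; omega
  · have := List.mem_range'_1.mp k.2; omega

def pvTiles (l pat : List Char) : Prop := ∃ m, l = (List.replicate m pat).flatten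

lemma pv_flatten_len (m : Nat) (pat : List Char) :
    ((List.replicate m pat).flatten).length = m * pat.length := by
  simp [List.length_flatten, List.map_replicate, List.sum_replicate, smul_eq_mul]

lemma pvTiles_cons_iff {l pat : List Char} (hp : pat ≠ []) (hl : l ≠ []) :
    pvTiles l pat ↔ pat <+: l ∧ pvTiles (l.drop pat.length) pat := by
  constructor
  · rintro ⟨m, rfl⟩
    cases m with
    | zero => simp at hl
    | succ m =>
      simp only [List.replicate_succ, List.flatten_cons]
      refine ⟨List.prefix_append _ _, m, ?_⟩
      rw [List.drop_append_of_le_length (by simp), List.drop_length, List.nil_append]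
  · rintro ⟨hpre, m, hm⟩
    refine ⟨m + 1, ?_⟩
    simp only [List.replicate_succ, List.flatten_cons, ← hm]
    conv_lhs => rw [← List.take_append_drop pat.length l]
    congr 1
    exact (List.prefix_iff_eq_take.mp hpre).symm

lemma pv_go_nil_acc (old : List Char) : ∀ fuel (l acc : List Char),
    PySem.Chars.replace.go old [] fuel l acc = acc.reverse ++ PySem.Chars.replace.go old [] fuel l [] := by
  intro fuel
  induction fuel with
  | zero => intro l acc; simp [PySem.Chars.replace.go]
  | succ fuel ih =>
    intro l acc
    cases l with
    | nil => simp [PySem.Chars.replace.go]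
    | cons c t =>
      simp only [PySem.Chars.replace.go]
      by_cases h : old.isPrefixOf (c :: t)
      · simp only [h, if_true]
        exact ih _ acc
      · simp only [h]
        rw [ih t (c :: acc), ih t [c]]
        simp

lemma pv_go_nil_iff (old : List Char) (hp : old ≠ []) : ∀ fuel (l : List Char), l.length ≤ fuel →
    (PySem.Chars.replace.go old [] fuel l [] = [] ↔ pvTiles l old) := by
  intro fuel
  induction fuel with
  | zero =>
    intro l hl
    have : l = [] := List.eq_nil_of_length_eq_zero (by omega)
    subst this
    exact iff_of_true (by simp [PySem.Chars.replace.go]) ⟨0, rfl⟩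
  | succ fuel ih =>
    intro l hl
    cases l with
    | nil =>
      exact iff_of_true (by simp [PySem.Chars.replace.go]) ⟨0, rfl⟩
    | cons c t =>
      simp only [PySem.Chars.replace.go]
      by_cases h : old.isPrefixOf (c :: t)
      · simp only [h, if_true, List.reverse_nil, List.nil_append]
        have hpre : old <+: (c :: t) := List.isPrefixOf_iff_prefix.mp h
        have h1 : 1 ≤ old.length := by cases old <;> simp_all
        have hlen : ((c :: t).drop old.length).length ≤ fuel := by
          simp only [List.length_drop, List.length_cons]
          simp only [List.length_cons] at hl
          omega
        rw [ih _ hlen]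
        conv_rhs => rw [pvTiles_cons_iff hp (List.cons_ne_nil c t)]
        simp [hpre]
      · simp only [h]
        rw [pv_go_nil_acc old fuel t [c]]
        constructor
        · intro hcontra; simp at hcontra
        · rintro ht
          exfalso
          rcases (pvTiles_cons_iff hp (by simp)).mp ht with ⟨hpre, -⟩
          exact h (List.isPrefixOf_iff_prefix.mpr hpre)

lemma pv_replace_nil_iff {l pat : List Char} (hp : pat ≠ []) :
    (PySem.Chars.replace l pat [] = []) ↔ pvTiles l pat := by
  rw [PySem.Chars.replace]
  simp only [List.isEmpty_iff]
  rw [if_neg hp]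
  exact pv_go_nil_iff pat hp l.length l le_rfl

lemma pv_shift_tiles (p : Nat) (hp : 0 < p) : ∀ L (l : List Char), l.length = L → p ∣ L →
    l.take (L - p) = l.drop p → pvTiles l (l.take p) := by
  intro L
  induction L using Nat.strong_induction_on with
  | _ L IH =>
    intro l hlen hdvd hshift
    rcases Nat.eq_zero_or_pos L with h0 | hLpos
    · subst h0
      have : l = [] := List.eq_nil_of_length_eq_zero hlen
      exact ⟨0, by simp [this]⟩
    have hpL : p ≤ L := Nat.le_of_dvd hLpos hdvd
    rcases eq_or_lt_of_le hpL with heq | hlt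
    · refine ⟨1, ?_⟩
      simp [List.take_of_length_le (by omega : l.length ≤ p)]
    · have h2p : p + p ≤ L := by
        rcases hdvd with ⟨k, rfl⟩
        have : 2 ≤ k := by nlinarith
        nlinarith
      have htake : (l.drop p).take p = l.take p := by
        rw [← hshift, List.take_take]
        congr 1
        omega
      have h3 := congrArg (List.drop p) hshift
      rw [List.drop_take, List.drop_drop] at h3
      have hdvd' : p ∣ L - p := Nat.dvd_sub hdvd dvd_rfl
      have hrec := IH (L - p) (by omega) (l.drop p) (by simp [hlen]) hdvd'
        (by rw [List.drop_drop]; exact h3)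
      rw [htake] at hrec
      rcases hrec with ⟨m, hm⟩
      refine ⟨m + 1, ?_⟩
      rw [List.replicate_succ, List.flatten_cons, ← hm, List.take_append_drop]

lemma pv_tiles_shift {l : List Char} {p : Nat} (hd : p ∣ l.length)
    (ht : pvTiles l (l.take p)) : l.take (l.length - p) = l.drop p := by
  rcases ht with ⟨m, hm⟩
  cases m with
  | zero =>
    simp at hm
    simp [hm]
  | succ m =>
    rcases eq_or_ne l [] with rfl | hne
    · simp
    have hLpos : 0 < l.length := List.length_pos_iff.mpr hne
    have hpL : p ≤ l.length := Nat.le_of_dvd hLpos hd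
    set pat := l.take p with hpatdef
    have hpat : pat.length = p := by simp [hpatdef, List.length_take]; omega
    have hLen : l.length = (m + 1) * p := by
      conv_lhs => rw [hm]
      rw [pv_flatten_len, hpat]
    have hdrop : l.drop p = (List.replicate m pat).flatten := by
      conv_lhs => rw [hm, List.replicate_succ, List.flatten_cons]
      rw [← hpat]
      exact List.drop_left
    have htake : l.take (m * p) = (List.replicate m pat).flatten := by
      conv_lhs => rw [hm, List.replicate_succ', List.flatten_append]
      simp only [List.flatten_cons, List.flatten_nil, List.append_nil]
      apply List.take_left'
      rw [pv_flatten_len, hpat]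
    rw [show l.length - p = m * p from by rw [hLen, Nat.succ_mul]; omega, htake, hdrop]

lemma pv_cond_eq (u : List Char) (p : Nat) (hp : 0 < p) (hne : u ≠ []) (hd : p ∣ u.length) :
    (PySem.Chars.replace u (u.take p) [] == ([] : List Char)) = (u.take (u.length - p) == u.drop p) := by
  have hpL : p ≤ u.length := Nat.le_of_dvd (List.length_pos_iff.mpr hne) hd
  have hpatne : u.take p ≠ [] := by
    intro h
    rcases List.take_eq_nil_iff.mp h with h0 | h0
    · omega
    · exact hne h0
  apply Bool.eq_iff_iff.mpr
  simp only [beq_iff_eq]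
  constructor
  · intro h
    exact pv_tiles_shift hd ((pv_replace_nil_iff hpatne).mp h)
  · intro h
    exact (pv_replace_nil_iff hpatne).mpr (pv_shift_tiles p hp u.length u rfl hd h)

def pvMemoOK (cs : List Char) (memo : PySem.Dict (Nat × Nat) (List Char)) : Prop :=
  ∀ p v, memo.get? p = some v → v = pvBest cs p.1 p.2

lemma pv_fold1B (cs : List Char) (i j : Nat)
    (IH : ∀ i' j' memo, j' + 1 - i' < j + 1 - i → pvMemoOK cs memo →
      (pvB_best cs i' j' memo).1 = pvBest cs i' j' ∧ pvMemoOK cs (pvB_best cs i' j' memo).2)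
    (h5 : ¬ j + 1 - i < 5) :
    ∀ (l : List {x // x ∈ List.range' 1 ((j + 1 - i) / 2)})
      (st0 : List Char × PySem.Dict (Nat × Nat) (List Char)), pvMemoOK cs st0.2 →
      (l.foldl (fun st pl =>
        if PySem.Int.mod ((j + 1 - i : Nat) : Int) (pl.1 : Int) == 0
            && (PySem.List.slice cs (some (i : Int)) (some ((j : Int) + 1 - (pl.1 : Int)))
                == PySem.List.slice cs (some ((i : Int) + (pl.1 : Int))) (some ((j : Int) + 1))) then
          let pr := pvB_best cs i (i + pl.1 - 1) st.2
          let enc := PySem.Int.toChars (PySem.Int.floordiv ((j + 1 - i : Nat) : Int) (pl.1 : Int))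
            ++ '[' :: pr.1 ++ [']']
          (if enc.length < st.1.length then enc else st.1, pr.2)
        else st) st0).1
      = l.foldl (fun res pl =>
        if PySem.Int.mod ((j + 1 - i : Nat) : Int) (pl.1 : Int) == 0
            && (PySem.List.slice cs (some (i : Int)) (some ((j : Int) + 1 - (pl.1 : Int)))
                == PySem.List.slice cs (some ((i : Int) + (pl.1 : Int))) (some ((j : Int) + 1))) then
          let enc := PySem.Int.toChars (PySem.Int.floordiv ((j + 1 - i : Nat) : Int) (pl.1 : Int))
            ++ '[' :: pvBest cs i (i + pl.1 - 1) ++ [']']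
          if enc.length < res.length then enc else res
        else res) st0.1
      ∧ pvMemoOK cs (l.foldl (fun st pl =>
        if PySem.Int.mod ((j + 1 - i : Nat) : Int) (pl.1 : Int) == 0
            && (PySem.List.slice cs (some (i : Int)) (some ((j : Int) + 1 - (pl.1 : Int)))
                == PySem.List.slice cs (some ((i : Int) + (pl.1 : Int))) (some ((j : Int) + 1))) then
          let pr := pvB_best cs i (i + pl.1 - 1) st.2
          let enc := PySem.Int.toChars (PySem.Int.floordiv ((j + 1 - i : Nat) : Int) (pl.1 : Int))
            ++ '[' :: pr.1 ++ [']']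
          (if enc.length < st.1.length then enc else st.1, pr.2)
        else st) st0).2 := by
  intro l
  induction l with
  | nil => intro st0 hm; exact ⟨rfl, hm⟩
  | cons hd tl ihl =>
    intro st0 hm
    simp only [List.foldl_cons]
    have hw : (i + hd.1 - 1) + 1 - i < j + 1 - i := by
      have := List.mem_range'_1.mp hd.2
      omega
    by_cases hc : (PySem.Int.mod ((j + 1 - i : Nat) : Int) (hd.1 : Int) == 0
        && (PySem.List.slice cs (some (i : Int)) (some ((j : Int) + 1 - (hd.1 : Int)))
            == PySem.List.slice cs (some ((i : Int) + (hd.1 : Int))) (some ((j : Int) + 1)))) = true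
    · rw [if_pos hc, if_pos hc]
      have hrec := IH i (i + hd.1 - 1) st0.2 hw hm
      rw [hrec.1]
      exact ihl _ hrec.2
    · rw [if_neg hc, if_neg hc]
      exact ihl _ hm

lemma pv_fold2B (cs : List Char) (i j : Nat)
    (IH : ∀ i' j' memo, j' + 1 - i' < j + 1 - i → pvMemoOK cs memo →
      (pvB_best cs i' j' memo).1 = pvBest cs i' j' ∧ pvMemoOK cs (pvB_best cs i' j' memo).2)
    (h5 : ¬ j + 1 - i < 5) :
    ∀ (l : List {x // x ∈ List.range' (i + 1) (j - (i + 1))})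
      (st0 : List Char × PySem.Dict (Nat × Nat) (List Char)), pvMemoOK cs st0.2 →
      (l.foldl (fun st k =>
        let pa := pvB_best cs i k.1 st.2
        let pb := pvB_best cs (k.1 + 1) j pa.2
        let cand := pa.1 ++ pb.1
        (if cand.length < st.1.length then cand else st.1, pb.2)) st0).1
      = l.foldl (fun res k =>
        let cand := pvBest cs i k.1 ++ pvBest cs (k.1 + 1) j
        if cand.length < res.length then cand else res) st0.1
      ∧ pvMemoOK cs (l.foldl (fun st k =>
        let pa := pvB_best cs i k.1 st.2
        let pb := pvB_best cs (k.1 + 1) j pa.2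
        let cand := pa.1 ++ pb.1
        (if cand.length < st.1.length then cand else st.1, pb.2)) st0).2 := by
  intro l
  induction l with
  | nil => intro st0 hm; exact ⟨rfl, hm⟩
  | cons hd tl ihl =>
    intro st0 hm
    simp only [List.foldl_cons]
    have hb := List.mem_range'_1.mp hd.2
    have hwa : hd.1 + 1 - i < j + 1 - i := by omega
    have hwb : j + 1 - (hd.1 + 1) < j + 1 - i := by omega
    have hra := IH i hd.1 st0.2 hwa hm
    have hrb := IH (hd.1 + 1) j _ hwb hra.2
    rw [hra.1, hrb.1]
    exact ihl _ hrb.2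

theorem pv_memoB (cs : List Char) : ∀ N i j memo, j + 1 - i ≤ N → pvMemoOK cs memo →
    (pvB_best cs i j memo).1 = pvBest cs i j ∧ pvMemoOK cs (pvB_best cs i j memo).2 := by
  intro N
  induction N with
  | zero =>
    intro i j memo hN hm
    rcases hmem : memo.get? (i, j) with _ | v
    · rw [pvB_best, pvBest, hmem]
      simp only [dif_pos (by omega : j + 1 - i < 5)]
      refine ⟨by trivial, ?_⟩
      intro p v hget
      rw [PySem.Dict.get?_insert] at hget
      split_ifs at hget with hpij
      · subst hpij
        rw [pvBest]
        simp only [dif_pos (by omega : j + 1 - i < 5)]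
        exact (Option.some_inj.mp hget).symm
      · exact hm p v hget
    · rw [pvB_best, hmem]
      exact ⟨hm (i, j) v hmem, hm⟩
  | succ N ih =>
    intro i j memo hN hm
    have IH : ∀ i' j' memo', j' + 1 - i' < j + 1 - i → pvMemoOK cs memo' →
        (pvB_best cs i' j' memo').1 = pvBest cs i' j' ∧ pvMemoOK cs (pvB_best cs i' j' memo').2 := by
      intro i' j' memo' hlt hm'
      exact ih i' j' memo' (by omega) hm'
    rcases hmem : memo.get? (i, j) with _ | v
    · by_cases h5 : j + 1 - i < 5
      · rw [pvB_best, pvBest, hmem]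
        simp only [dif_pos h5]
        refine ⟨by trivial, ?_⟩
        intro p v hget
        rw [PySem.Dict.get?_insert] at hget
        split_ifs at hget with hpij
        · subst hpij
          rw [pvBest]
          simp only [dif_pos h5]
          exact (Option.some_inj.mp hget).symm
        · exact hm p v hget
      · rw [pvB_best, hmem]
        simp only [dif_neg h5]
        have h1 := pv_fold1B cs i j IH h5 (List.range' 1 ((j + 1 - i) / 2)).attach
          ((PySem.List.slice cs (some (i : Int)) (some ((j : Int) + 1))), memo) hm
        have h2 := pv_fold2B cs i j IH h5 (List.range' (i + 1) (j - (i + 1))).attach _ h1.2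
        refine ⟨?_, ?_⟩
        · rw [h2.1, h1.1, pvBest]
          simp only [dif_neg h5]
        · intro p v hget
          rw [PySem.Dict.get?_insert] at hget
          split_ifs at hget with hpij
          · subst hpij
            rw [← Option.some_inj.mp hget, h2.1, h1.1, pvBest]
            simp only [dif_neg h5]
          · exact h2.2 p v hget
    · rw [pvB_best, hmem]
      exact ⟨hm (i, j) v hmem, hm⟩

def pvShape (n : Nat) (dp : List (List (List Char))) : Prop :=
  dp.length = n ∧ ∀ i, i < n → (dp.getD i []).length = n

def pvInvW (cs : List Char) (n : Nat) (dp : List (List (List Char))) (s : Nat) : Prop :=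
  ∀ i j, i < n → j < n → 1 ≤ j + 1 - i → j + 1 - i ≤ s → pvA_get dp i j = pvBest cs i j

lemma pv_slice_ij (cs : List Char) (i j : Nat) :
    PySem.List.slice cs (some (i : Int)) (some ((j : Int) + 1)) = (cs.drop i).take (j + 1 - i) := by
  rw [show ((j : Int) + 1) = ((j + 1 : Nat) : Int) by push_cast; ring, PySem.List.slice_natCast]

lemma pv_row_set (dp : List (List (List Char))) (i i' : Nat) (r : List (List Char))
    (hi : i < dp.length) :
    (dp.set i r).getD i' [] = if i' = i then r else dp.getD i' [] := by
  rw [List.getD_eq_getElem?_getD, List.getElem?_set]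
  by_cases hii : i = i'
  · rw [if_pos hii, if_pos (by omega)]
    simp [hii.symm]
  · rw [if_neg hii, ← List.getD_eq_getElem?_getD]
    rw [if_neg (Ne.symm hii)]

lemma pv_col_set (row : List (List Char)) (j j' : Nat) (v : List Char) (hj : j < row.length) :
    (row.set j v).getD j' [] = if j' = j then v else row.getD j' [] := by
  rw [List.getD_eq_getElem?_getD, List.getElem?_set]
  by_cases hjj : j = j'
  · rw [if_pos hjj, if_pos (by omega)]
    simp [hjj.symm]
  · rw [if_neg hjj, ← List.getD_eq_getElem?_getD]
    rw [if_neg (Ne.symm hjj)]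

lemma pvA_get_set (n : Nat) (dp : List (List (List Char))) (i j i' j' : Nat) (v : List Char)
    (hsh : pvShape n dp) (hi : i < n) (hj : j < n) :
    pvA_get (pvA_set dp i j v) i' j' = if i' = i ∧ j' = j then v else pvA_get dp i' j' := by
  rcases hsh with ⟨hlen, hrow⟩
  unfold pvA_get pvA_set
  rw [pv_row_set dp i i' _ (by omega)]
  by_cases hii : i' = i
  · rw [if_pos hii, pv_col_set _ j j' v (by rw [hrow i hi]; omega)]
    by_cases hjj : j' = j
    · rw [if_pos hjj, if_pos ⟨hii, hjj⟩]
    · rw [if_neg hjj, if_neg (by tauto), hii]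
  · rw [if_neg hii, if_neg (by tauto)]

lemma pvShape_set (n : Nat) (dp : List (List (List Char))) (i j : Nat) (v : List Char)
    (hsh : pvShape n dp) (hi : i < n) : pvShape n (pvA_set dp i j v) := by
  rcases hsh with ⟨hlen, hrow⟩
  refine ⟨by simp [pvA_set, hlen], ?_⟩
  intro i' hi'
  unfold pvA_set
  rw [List.getD_eq_getElem?_getD, List.getElem?_set]
  by_cases hii : i = i'
  · rw [if_pos hii, if_pos (by omega)]
    simp only [Option.getD_some, List.length_set]
    exact hii ▸ hrow i hi
  · rw [if_neg hii, ← List.getD_eq_getElem?_getD]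
    exact hrow i' hi'

lemma pv_bestA_eq (cs : List Char) (n : Nat) (dp : List (List (List Char))) (i j : Nat)
    (hjn : j < n) (h5 : ¬ j + 1 - i < 5) (hdp : pvInvW cs n dp (j - i)) (compressed : List Char) :
    pvA_best dp i j compressed = (List.range' (i + 1) (j - (i + 1))).attach.foldl (fun res k =>
      let cand := pvBest cs i k.1 ++ pvBest cs (k.1 + 1) j
      if cand.length < res.length then cand else res) compressed := by
  rw [List.foldl_attach (f := fun (res : List Char) (k : Nat) =>
    let cand := pvBest cs i k ++ pvBest cs (k + 1) j
    if cand.length < res.length then cand else res)]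
  unfold pvA_best
  apply PySem.List.foldl_congr_mem
  intro acc k hk
  have hb := List.mem_range'_1.mp hk
  have h1 : pvA_get dp i k = pvBest cs i k :=
    hdp i k (by omega) (by omega) (by omega) (by omega)
  have h2 : pvA_get dp (k + 1) j = pvBest cs (k + 1) j :=
    hdp (k + 1) j (by omega) (by omega) (by omega) (by omega)
  simp only [h1, h2]

lemma pv_compressA_eq (cs : List Char) (n : Nat) (hn : cs.length = n)
    (dp : List (List (List Char))) (i j : Nat) (hjn : j < n) (h5 : ¬ j + 1 - i < 5)
    (hdp : pvInvW cs n dp (j - i)) :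
    pvA_compress dp i (PySem.List.slice cs (some (i : Int)) (some ((j : Int) + 1)))
    = (List.range' 1 ((j + 1 - i) / 2)).attach.foldl (fun res pl =>
        if PySem.Int.mod ((j + 1 - i : Nat) : Int) (pl.1 : Int) == 0
            && (PySem.List.slice cs (some (i : Int)) (some ((j : Int) + 1 - (pl.1 : Int)))
                == PySem.List.slice cs (some ((i : Int) + (pl.1 : Int))) (some ((j : Int) + 1))) then
          let enc := PySem.Int.toChars (PySem.Int.floordiv ((j + 1 - i : Nat) : Int) (pl.1 : Int))
            ++ '[' :: pvBest cs i (i + pl.1 - 1) ++ [']']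
          if enc.length < res.length then enc else res
        else res) (PySem.List.slice cs (some (i : Int)) (some ((j : Int) + 1))) := by
  have hu : PySem.List.slice cs (some (i : Int)) (some ((j : Int) + 1)) = (cs.drop i).take (j + 1 - i) :=
    pv_slice_ij cs i j
  have hulen : (PySem.List.slice cs (some (i : Int)) (some ((j : Int) + 1))).length = j + 1 - i := by
    rw [hu]
    simp only [List.length_take, List.length_drop, hn]
    omega
  rw [List.foldl_attach (f := fun (res : List Char) (pl : Nat) =>
    if PySem.Int.mod ((j + 1 - i : Nat) : Int) (pl : Int) == 0
        && (PySem.List.slice cs (some (i : Int)) (some ((j : Int) + 1 - (pl : Int)))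
            == PySem.List.slice cs (some ((i : Int) + (pl : Int))) (some ((j : Int) + 1))) then
      let enc := PySem.Int.toChars (PySem.Int.floordiv ((j + 1 - i : Nat) : Int) (pl : Int))
        ++ '[' :: pvBest cs i (i + pl - 1) ++ [']']
      if enc.length < res.length then enc else res
    else res), List.range'_eq_map_range, List.foldl_map]
  unfold pvA_compress
  rw [hulen]
  apply PySem.List.foldl_congr_mem
  intro acc k hk
  have hk2 : k < (j + 1 - i) / 2 := List.mem_range.mp hk
  have hkj : k + 1 ≤ j - i := by omega
  set u := PySem.List.slice cs (some (i : Int)) (some ((j : Int) + 1)) with hudef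
  -- the pattern substr[:k+1]
  have hpat : PySem.List.slice u none (some ((k : Int) + 1)) = u.take (k + 1) := by
    rw [show ((k : Int) + 1) = ((k + 1 : Nat) : Int) by push_cast; ring, PySem.List.slice_to_natCast]
  have hpatlen : (u.take (k + 1)).length = k + 1 := by
    simp only [List.length_take, hulen]
    omega
  simp only [hpat, hpatlen]
  -- 1 + k on the B side is k + 1
  rw [show 1 + k = k + 1 by omega, show i + (k + 1) - 1 = i + k by omega]
  by_cases hdvd : (j + 1 - i) % (k + 1) = 0
  · -- the two tiling tests agree
    have hune : u ≠ [] := by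
      intro h
      rw [h] at hulen
      simp at hulen
      omega
    have hc2 : (PySem.Chars.replace u (u.take (k + 1)) [] == ([] : List Char))
        = (u.take (u.length - (k + 1)) == u.drop (k + 1)) :=
      pv_cond_eq u (k + 1) (by omega) hune (by rw [hulen]; exact Nat.dvd_of_mod_eq_zero hdvd)
    have hsl1 : PySem.List.slice cs (some (i : Int)) (some ((j : Int) + 1 - ((k + 1 : Nat) : Int)))
        = u.take (u.length - (k + 1)) := by
      rw [show ((j : Int) + 1 - ((k + 1 : Nat) : Int)) = ((j - k : Nat) : Int) by push_cast; omega,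
        PySem.List.slice_natCast, hu, List.take_take]
      congr 1
      simp only [List.length_take, List.length_drop, hn]
      omega
    have hsl2 : PySem.List.slice cs (some ((i : Int) + ((k + 1 : Nat) : Int))) (some ((j : Int) + 1))
        = u.drop (k + 1) := by
      rw [show ((i : Int) + ((k + 1 : Nat) : Int)) = ((i + (k + 1) : Nat) : Int) by push_cast; ring,
        show ((j : Int) + 1) = ((j + 1 : Nat) : Int) by push_cast; ring,
        PySem.List.slice_natCast, hu, List.drop_take, List.drop_drop]
      rw [show j + 1 - (i + (k + 1)) = j + 1 - i - (k + 1) from by omega,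
        show i + (k + 1) = k + 1 + i from by omega]
    have hget : pvA_get dp i (i + k) = pvBest cs i (i + k) :=
      hdp i (i + k) (by omega) (by omega) (by omega) (by omega)
    rw [hsl1, hsl2, ← hc2, hget]
  · -- the `size % plen == 0` conjunct is false on both sides
    have hmf : (PySem.Int.mod ((j + 1 - i : Nat) : Int) ((k + 1 : Nat) : Int) == 0) = false := by
      rw [PySem.Int.mod_natCast]
      exact beq_eq_false_iff_ne.mpr (by exact_mod_cast hdvd)
    rw [hmf]
    simp

lemma pv_cellA (cs : List Char) (n : Nat) (hn : cs.length = n) (dp : List (List (List Char)))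
    (i size : Nat) (h1 : 1 ≤ size) (hle : i + size ≤ n)
    (hdp : pvInvW cs n dp (size - 1)) :
    (if size < 5 then PySem.List.slice cs (some (i : Int)) (some (((i + size - 1 : Nat) : Int) + 1))
     else pvA_best dp i (i + size - 1)
       (pvA_compress dp i (PySem.List.slice cs (some (i : Int)) (some (((i + size - 1 : Nat) : Int) + 1)))))
    = pvBest cs i (i + size - 1) := by
  have hdp' : pvInvW cs n dp ((i + size - 1) - i) := by
    rw [show (i + size - 1) - i = size - 1 from by omega]
    exact hdp
  by_cases h5 : size < 5
  · rw [if_pos h5, pvBest]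
    rw [dif_pos (by omega : (i + size - 1) + 1 - i < 5)]
  · rw [if_neg h5,
      pv_compressA_eq cs n hn dp i (i + size - 1) (by omega) (by omega) hdp',
      pv_bestA_eq cs n dp i (i + size - 1) (by omega) (by omega) hdp', pvBest]
    rw [dif_neg (by omega : ¬ (i + size - 1) + 1 - i < 5)]

lemma pv_innerA (cs : List Char) (n : Nat) (hn : cs.length = n) (size : Nat)
    (h1 : 1 ≤ size) (hsz : size ≤ n) :
    ∀ m dp, m ≤ n - size + 1 → pvShape n dp → pvInvW cs n dp (size - 1) →
      pvShape n ((List.range m).foldl (fun dp i =>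
        let j := i + size - 1
        let substr := PySem.List.slice cs (some (i : Int)) (some ((j : Int) + 1))
        if size < 5 then pvA_set dp i j substr
        else pvA_set dp i j (pvA_best dp i j (pvA_compress dp i substr))) dp)
      ∧ pvInvW cs n ((List.range m).foldl (fun dp i =>
        let j := i + size - 1
        let substr := PySem.List.slice cs (some (i : Int)) (some ((j : Int) + 1))
        if size < 5 then pvA_set dp i j substr
        else pvA_set dp i j (pvA_best dp i j (pvA_compress dp i substr))) dp) (size - 1)
      ∧ ∀ i', i' < m → pvA_get ((List.range m).foldl (fun dp i =>
        let j := i + size - 1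
        let substr := PySem.List.slice cs (some (i : Int)) (some ((j : Int) + 1))
        if size < 5 then pvA_set dp i j substr
        else pvA_set dp i j (pvA_best dp i j (pvA_compress dp i substr))) dp) i' (i' + size - 1)
        = pvBest cs i' (i' + size - 1) := by
  intro m
  induction m with
  | zero =>
    intro dp hm hsh hdp
    exact ⟨hsh, hdp, by omega⟩
  | succ m ih =>
    intro dp hm hsh hdp
    rw [List.range_succ, List.foldl_append, List.foldl_cons, List.foldl_nil]
    obtain ⟨hsh', hdp', hnew⟩ := ih dp (by omega) hsh hdp
    -- the written value is pvBest of the new cell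
    have hval : (if size < 5 then PySem.List.slice cs (some (m : Int)) (some (((m + size - 1 : Nat) : Int) + 1))
        else pvA_best _ m (m + size - 1)
          (pvA_compress _ m (PySem.List.slice cs (some (m : Int)) (some (((m + size - 1 : Nat) : Int) + 1)))))
        = pvBest cs m (m + size - 1) :=
      pv_cellA cs n hn _ m size h1 (by omega) hdp'
    have hmn : m < n := by omega
    have hjn : m + size - 1 < n := by omega
    simp only [← apply_ite (pvA_set _ m (m + size - 1))]
    rw [hval]
    refine ⟨pvShape_set n _ m (m + size - 1) _ hsh' hmn, ?_, ?_⟩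
    · intro a b ha hb hw1 hw2
      rw [pvA_get_set n _ m (m + size - 1) a b _ hsh' hmn hjn]
      rw [if_neg (by rintro ⟨rfl, rfl⟩; omega)]
      exact hdp' a b ha hb hw1 hw2
    · intro i' hi'
      rw [pvA_get_set n _ m (m + size - 1) i' (i' + size - 1) _ hsh' hmn hjn]
      by_cases hii : i' = m
      · rw [if_pos ⟨hii, by rw [hii]⟩, hii]
      · rw [if_neg (by rintro ⟨rfl, -⟩; omega)]
        exact hnew i' (by omega)

lemma pv_outerA (cs : List Char) (n : Nat) (hn : cs.length = n) :
    ∀ s, s ≤ n →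
      pvShape n ((List.range s).foldl (fun dp s =>
        let size := s + 1
        (List.range (n - size + 1)).foldl (fun dp i =>
          let j := i + size - 1
          let substr := PySem.List.slice cs (some (i : Int)) (some ((j : Int) + 1))
          if size < 5 then pvA_set dp i j substr
          else pvA_set dp i j (pvA_best dp i j (pvA_compress dp i substr))) dp)
        (List.replicate n (List.replicate n [])))
      ∧ pvInvW cs n ((List.range s).foldl (fun dp s =>
        let size := s + 1
        (List.range (n - size + 1)).foldl (fun dp i =>
          let j := i + size - 1
          let substr := PySem.List.slice cs (some (i : Int)) (some ((j : Int) + 1))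
          if size < 5 then pvA_set dp i j substr
          else pvA_set dp i j (pvA_best dp i j (pvA_compress dp i substr))) dp)
        (List.replicate n (List.replicate n []))) s := by
  intro s
  induction s with
  | zero =>
    intro _
    simp only [List.range_zero, List.foldl_nil]
    refine ⟨⟨by simp, ?_⟩, ?_⟩
    · intro i hi
      rw [List.getD_eq_getElem?_getD, List.getElem?_replicate, if_pos hi]
      simp
    · intro i j _ _ hw1 hw2
      omega
  | succ s ihs =>
    intro hs
    rw [List.range_succ, List.foldl_append, List.foldl_cons, List.foldl_nil]
    obtain ⟨hsh, hinv⟩ := ihs (by omega)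
    have hinner := pv_innerA cs n hn (s + 1) (by omega) (by omega) (n - (s + 1) + 1) _
      le_rfl hsh (by simpa using hinv)
    obtain ⟨hsh', hinv', hnew⟩ := hinner
    refine ⟨hsh', ?_⟩
    intro i j hi hj hw1 hw2
    by_cases hw : j + 1 - i ≤ s
    · exact hinv' i j hi hj hw1 (by simpa using hw)
    · have hij : j = i + (s + 1) - 1 := by omega
      have him : i < n - (s + 1) + 1 := by omega
      rw [hij]
      exact hnew i him

-- ===== VERDICT (by name: the statement is the Claim_ definition above) =====
theorem encode_with_shortest_length_spec : Claim_equal_encode_with_shortest_length := by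
  intro s hdom hpre
  unfold Spec_encode_with_shortest_length
  simp only [encode_with_shortest_length, encode_with_shortest_length_alt]
  have hne : s.toList ≠ [] := by
    intro hc
    apply hpre
    simpa using congrArg String.ofList hc
  have hnpos : 0 < s.toList.length := List.length_pos_iff.mpr hne
  rw [if_neg (by simpa using hne)]
  have hout := pv_outerA s.toList s.toList.length rfl s.toList.length le_rfl
  have hA := hout.2 0 (s.toList.length - 1) hnpos (by omega) (by omega) (by omega)
  have hB := (pv_memoB s.toList s.toList.length 0 (s.toList.length - 1) PySem.Dict.empty
    (by omega) (fun p v h => by simp [PySem.Dict.get?, PySem.Dict.empty] at h)).1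
  rw [hA, hB]

theorem encode_with_shortest_length_raises : Claim_raises_encode_with_shortest_length := by
  unfold Claim_raises_encode_with_shortest_length
  exact ⟨fun s _ hr hp => hp hr, by decide⟩

-- self-check: the crash-fix witness value really is what B returns on ""
theorem encode_with_shortest_length_raises_witness_ok :
    encode_with_shortest_length_alt pvRaiseWitness_encode_with_shortest_length
      = pvRaiseWitnessOut_encode_with_shortest_length :=
  encode_with_shortest_length_raises.2.2.2
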